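-- pv_equiv track=rewrite | github.com/sasha123c/github-test | main.py | find_largest_abs
-- ===== SOURCE A (Python) =====
-- def find_largest_abs(matrix):
--   n = len(matrix)
--   max_val = abs(matrix[0][0])
--   max_row = max_col = 0
--
--   for i in range(n):
--       for j in range(n):
--           if abs(matrix[i][j]) > max_val:
--               max_val = abs(matrix[i][j])
--               max_row = i
--               max_col = j
--
--   return max_val, max_row, max_col
-- ===== SOURCE B (Python) =====
-- def find_largest_abs(matrix):
--     n = len(matrix)
--     cells = [(i, j) for i in range(n) for j in range(n)]
--     max_val = max(abs(matrix[i][j]) for i, j in cells)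
--     i, j = next((i, j) for i, j in cells if abs(matrix[i][j]) == max_val)
--     return max_val, i, j
-- ===== Notes on version B (the rewrite author's own statement) =====
-- stated objective: idiomatic
-- what changed: B replaces A's single running-max loop with a two-phase decomposition: compute the maximum absolute value with max() over all cells, then locate its first row-major occurrence with next(); first-match locating preserves A's strict-> tie-breaking.
import Mathlib
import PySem

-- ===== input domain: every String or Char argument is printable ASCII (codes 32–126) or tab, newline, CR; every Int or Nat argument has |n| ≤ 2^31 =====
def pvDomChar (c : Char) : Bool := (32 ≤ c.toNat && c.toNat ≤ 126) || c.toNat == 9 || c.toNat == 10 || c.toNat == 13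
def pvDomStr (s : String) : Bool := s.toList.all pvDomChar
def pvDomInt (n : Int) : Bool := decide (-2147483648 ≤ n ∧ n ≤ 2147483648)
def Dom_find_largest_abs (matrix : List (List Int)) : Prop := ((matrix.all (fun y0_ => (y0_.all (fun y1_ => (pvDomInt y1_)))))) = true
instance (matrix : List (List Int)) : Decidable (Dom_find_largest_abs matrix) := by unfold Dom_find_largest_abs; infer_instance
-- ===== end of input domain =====

-- B re-implements A as a two-phase scan (global max of |cell| first, then the first
-- row-major cell attaining it), instead of A's single running-max loop; same cost,
-- equal return value on Pre_ (square-shaped input, nonempty).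

-- ===== PORT A =====
def find_largest_abs (matrix : List (List Int)) : Int × Int × Int :=
  let n : Int := matrix.length
  let max_val : Int := |PySem.List.pyGetD (PySem.List.pyGetD matrix 0 []) 0 0|
  (PySem.List.pyRange 0 n 1).foldl (fun s i =>
    (PySem.List.pyRange 0 n 1).foldl (fun s j =>
      if |PySem.List.pyGetD (PySem.List.pyGetD matrix i []) j 0| > s.1 then
        (|PySem.List.pyGetD (PySem.List.pyGetD matrix i []) j 0|, i, j)
      else s) s) (max_val, 0, 0)

-- ===== PORT B =====
def find_largest_abs_alt (matrix : List (List Int)) : Int × Int × Int :=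
  let n : Int := matrix.length
  let cells : List (Int × Int) :=
    (PySem.List.pyRange 0 n 1).flatMap (fun i => (PySem.List.pyRange 0 n 1).map (fun j => (i, j)))
  let max_val : Int :=
    (PySem.List.max? (cells.map (fun p => |PySem.List.pyGetD (PySem.List.pyGetD matrix p.1 []) p.2 0|)) (fun y => y)).getD 0
  match cells.find? (fun p => |PySem.List.pyGetD (PySem.List.pyGetD matrix p.1 []) p.2 0| == max_val) with
  | some p => (max_val, p.1, p.2)
  | none => (0, 0, 0)

-- ===== PRECONDITION & SPEC =====
-- Pre_ excludes exactly the inputs where the Python A raises IndexError: the empty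
-- matrix (matrix[0][0]) and matrices with a row shorter than len(matrix).
def Pre_find_largest_abs (matrix : List (List Int)) : Prop :=
  matrix ≠ [] ∧ ∀ row ∈ matrix, matrix.length ≤ row.length
instance (matrix : List (List Int)) : Decidable (Pre_find_largest_abs matrix) := by
  unfold Pre_find_largest_abs; infer_instance
def pvWitness_find_largest_abs : List (List Int) := [[1, -5], [3, 2]]

def Spec_find_largest_abs (matrix : List (List Int)) (out : Int × Int × Int) : Prop := out = find_largest_abs_alt matrix
instance (matrix : List (List Int)) (out : Int × Int × Int) : Decidable (Spec_find_largest_abs matrix out) := by unfold Spec_find_largest_abs; infer_instance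

-- ===== CLAIM (what is proved, stated in full; the proofs are below) =====
def Claim_equal_find_largest_abs : Prop := ∀ (matrix : List (List Int)), Dom_find_largest_abs matrix → Pre_find_largest_abs matrix → Spec_find_largest_abs matrix (find_largest_abs matrix)

-- ===== LEMMAS AND PROOFS =====

-- |matrix[p.1][p.2]| (with defaults, total)
def pvVal (m : List (List Int)) (p : Int × Int) : Int :=
  |PySem.List.pyGetD (PySem.List.pyGetD m p.1 []) p.2 0|

-- one step of A's running-max loop
def pvStep (m : List (List Int)) (s : Int × Int × Int) (p : Int × Int) : Int × Int × Int :=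
  if pvVal m p > s.1 then (pvVal m p, p.1, p.2) else s

-- running maximum of pvVal over a cell list, seeded with x
def pvMax (m : List (List Int)) (x : Int) (cs : List (Int × Int)) : Int :=
  cs.foldl (fun a c => max a (pvVal m c)) x

theorem pvMax_le_seed (m : List (List Int)) (x : Int) (cs : List (Int × Int)) :
    x ≤ pvMax m x cs := by
  induction cs generalizing x with
  | nil => simp [pvMax]
  | cons c t ih =>
      calc x ≤ max x (pvVal m c) := le_max_left _ _
        _ ≤ pvMax m (max x (pvVal m c)) t := ih _
        _ = pvMax m x (c :: t) := rfl

theorem pvMax_le_mem (m : List (List Int)) (cs : List (Int × Int))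
    (c : Int × Int) (hc : c ∈ cs) : ∀ x : Int, pvVal m c ≤ pvMax m x cs := by
  induction cs with
  | nil => cases hc
  | cons d t ih =>
      intro x
      rcases List.mem_cons.mp hc with h | h
      · subst h
        calc pvVal m c ≤ max x (pvVal m c) := le_max_right _ _
          _ ≤ pvMax m (max x (pvVal m c)) t := pvMax_le_seed m _ t
          _ = pvMax m x (c :: t) := rfl
      · exact ih h (max x (pvVal m d))

theorem pvMax_achieved (m : List (List Int)) (x : Int) (cs : List (Int × Int)) :
    pvMax m x cs = x ∨ ∃ c ∈ cs, pvVal m c = pvMax m x cs := by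
  induction cs generalizing x with
  | nil => left; rfl
  | cons d t ih =>
      rcases ih (max x (pvVal m d)) with h | ⟨c, hc, hv⟩
      · by_cases hx : pvVal m d ≤ x
        · left; simpa [pvMax, max_eq_left hx] using h
        · right
          refine ⟨d, List.mem_cons_self, ?_⟩
          have hxd : max x (pvVal m d) = pvVal m d := max_eq_right (by omega)
          show pvVal m d = pvMax m x (d :: t)
          have : pvMax m x (d :: t) = pvMax m (max x (pvVal m d)) t := rfl
          rw [this, h, hxd]
      · right; exact ⟨c, List.mem_cons_of_mem _ hc, hv⟩

theorem pv_find_congr {α : Type} (p q : α → Bool) (l : List α)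
    (h : ∀ x ∈ l, p x = q x) : l.find? p = l.find? q := by
  induction l with
  | nil => rfl
  | cons a t ih =>
      have ha := h a List.mem_cons_self
      by_cases hp : p a = true
      · rw [List.find?_cons_of_pos hp, List.find?_cons_of_pos (ha ▸ hp)]
      · rw [List.find?_cons_of_neg hp, List.find?_cons_of_neg (ha ▸ hp)]
        exact ih (fun x hx => h x (List.mem_cons_of_mem _ hx))

-- characterisation of A's loop: final state is (running max, first cell that both
-- beats the seed and attains the running max), or the seed state if none does
theorem pvFold_char (m : List (List Int)) (cs : List (Int × Int)) (s : Int × Int × Int) :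
    cs.foldl (pvStep m) s =
      match cs.find? (fun c => decide (s.1 < pvVal m c ∧ pvMax m s.1 cs ≤ pvVal m c)) with
      | some c => (pvMax m s.1 cs, c.1, c.2)
      | none => s := by
  induction cs generalizing s with
  | nil => rfl
  | cons d t ih =>
      have hMcons : pvMax m s.1 (d :: t) = pvMax m (max s.1 (pvVal m d)) t := rfl
      by_cases hd : s.1 < pvVal m d
      · -- the step updates the state
        have hstep : List.foldl (pvStep m) s (d :: t)
            = List.foldl (pvStep m) (pvVal m d, d.1, d.2) t := by
          simp [pvStep, hd]
        have hM : pvMax m s.1 (d :: t) = pvMax m (pvVal m d) t := by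
          rw [hMcons, max_eq_right (le_of_lt hd)]
        by_cases hmx : pvMax m s.1 (d :: t) ≤ pvVal m d
        · -- d attains the max: find? fires at d, and no later cell can beat it
          rw [List.find?_cons_of_pos
              (p := fun c => decide (s.1 < pvVal m c ∧ pvMax m s.1 (d :: t) ≤ pvVal m c))
              (by simp [hd, hmx]), hstep, ih]
          have hnone : t.find? (fun c => decide ((pvVal m d, d.1, d.2).1 < pvVal m c ∧
              pvMax m (pvVal m d, d.1, d.2).1 t ≤ pvVal m c)) = none := by
            apply List.find?_eq_none.mpr
            intro c hc
            simp only [decide_eq_true_eq, not_and]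
            intro hlt
            exfalso
            have h1 : pvVal m c ≤ pvMax m (pvVal m d) t := pvMax_le_mem m t c hc _
            have h2 : pvMax m (pvVal m d) t ≤ pvVal m d := hM ▸ hmx
            omega
          rw [hnone]
          have : pvMax m s.1 (d :: t) = pvVal m d :=
            le_antisymm hmx (hM ▸ pvMax_le_seed m _ t)
          simp [this]
        · -- max attained strictly later
          rw [List.find?_cons_of_neg
              (p := fun c => decide (s.1 < pvVal m c ∧ pvMax m s.1 (d :: t) ≤ pvVal m c))
              (by simp only [decide_eq_true_eq, not_and]; intro _; exact hmx), hstep, ih]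
          have hlt : pvVal m d < pvMax m (pvVal m d) t := by
            have := hM ▸ (lt_of_not_ge (fun h => hmx h))
            omega
          have hcong : t.find? (fun c => decide ((pvVal m d, d.1, d.2).1 < pvVal m c ∧
                pvMax m (pvVal m d, d.1, d.2).1 t ≤ pvVal m c))
              = t.find? (fun c => decide (s.1 < pvVal m c ∧ pvMax m s.1 (d :: t) ≤ pvVal m c)) := by
            apply pv_find_congr
            intro c _
            simp only [decide_eq_decide, hM]
            constructor
            · rintro ⟨h1, h2⟩; exact ⟨by omega, h2⟩
            · rintro ⟨h1, h2⟩; exact ⟨by omega, h2⟩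
          rw [hcong]
          rcases hfind : t.find? (fun c => decide (s.1 < pvVal m c ∧ pvMax m s.1 (d :: t) ≤ pvVal m c)) with _ | c
          · -- impossible: the max is attained in t
            exfalso
            rcases pvMax_achieved m (pvVal m d) t with h | ⟨c, hc, hv⟩
            · omega
            · have := List.find?_eq_none.mp hfind c hc
              simp only [decide_eq_true_eq, not_and] at this
              have h1 : s.1 < pvVal m c := by omega
              have h2 : pvMax m s.1 (d :: t) ≤ pvVal m c := le_of_eq (hM ▸ hv.symm)
              exact this h1 h2
          · simp [hM]
      · -- the step keeps the state
        have hstep : List.foldl (pvStep m) s (d :: t) = List.foldl (pvStep m) s t := by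
          simp [pvStep, hd]
        have hM : pvMax m s.1 (d :: t) = pvMax m s.1 t := by
          rw [hMcons, max_eq_left (by omega)]
        rw [List.find?_cons_of_neg
            (p := fun c => decide (s.1 < pvVal m c ∧ pvMax m s.1 (d :: t) ≤ pvVal m c))
            (by simp only [decide_eq_true_eq, not_and]; intro h; omega), hstep, ih, hM]

-- the two-phase form (B) of the running-max loop (A), for a nonempty cell list
-- seeded from its head
theorem pvFold_two_phase (m : List (List Int)) (c0 : Int × Int) (rest : List (Int × Int)) :
    (c0 :: rest).foldl (pvStep m) (pvVal m c0, c0.1, c0.2) =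
      match (c0 :: rest).find? (fun c => pvVal m c == pvMax m (pvVal m c0) rest) with
      | some c => (pvMax m (pvVal m c0) rest, c.1, c.2)
      | none => (0, 0, 0) := by
  set M := pvMax m (pvVal m c0) rest with hMdef
  have hseed : pvVal m c0 ≤ M := pvMax_le_seed m _ rest
  have hfirst : List.foldl (pvStep m) (pvVal m c0, c0.1, c0.2) (c0 :: rest)
      = List.foldl (pvStep m) (pvVal m c0, c0.1, c0.2) rest := by
    simp [pvStep]
  rw [hfirst, pvFold_char]
  have hMrest : pvMax m (pvVal m c0, c0.1, c0.2).1 rest = M := rfl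
  by_cases heq : pvVal m c0 = M
  · -- head already attains the max: A never updates, B finds the head
    rw [List.find?_cons_of_pos (p := fun c => pvVal m c == M) (by simp [heq])]
    have hnone : rest.find? (fun c => decide ((pvVal m c0, c0.1, c0.2).1 < pvVal m c ∧
        pvMax m (pvVal m c0, c0.1, c0.2).1 rest ≤ pvVal m c)) = none := by
      apply List.find?_eq_none.mpr
      intro c hc
      simp only [decide_eq_true_eq, not_and]
      intro hlt
      have := pvMax_le_mem m rest c hc (pvVal m c0)
      omega
    rw [hnone, heq]
  · have hlt : pvVal m c0 < M := lt_of_le_of_ne hseed heq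
    rw [List.find?_cons_of_neg (p := fun c => pvVal m c == M) (by simp [heq])]
    have hcong : rest.find? (fun c => decide ((pvVal m c0, c0.1, c0.2).1 < pvVal m c ∧
          pvMax m (pvVal m c0, c0.1, c0.2).1 rest ≤ pvVal m c))
        = rest.find? (fun c => pvVal m c == M) := by
      apply pv_find_congr
      intro c hc
      have hub := pvMax_le_mem m rest c hc (pvVal m c0)
      rw [← hMdef] at hub
      simp only [hMrest]
      show decide ((pvVal m c0, c0.1, c0.2).1 < pvVal m c ∧ M ≤ pvVal m c)
        = decide (pvVal m c = M)
      rw [decide_eq_decide]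
      constructor
      · rintro ⟨_, h2⟩; omega
      · intro h; omega
    rw [hcong]
    rcases hfind : rest.find? (fun c => pvVal m c == M) with _ | c
    · exfalso
      rcases pvMax_achieved m (pvVal m c0) rest with h | ⟨c, hc, hv⟩
      · exact heq (hMdef ▸ h.symm)
      · have := List.find?_eq_none.mp hfind c hc
        simp [hv] at this
        exact this hMdef.symm
    · rfl

-- A's nested range loop is the flat loop over the cell list
theorem pvA_eq_fold (m : List (List Int)) :
    find_largest_abs m =
      ((PySem.List.pyRange 0 (m.length : Int) 1).flatMap
        (fun i => (PySem.List.pyRange 0 (m.length : Int) 1).map (fun j => (i, j)))).foldl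
        (pvStep m) (pvVal m (0, 0), 0, 0) := by
  rw [List.foldl_flatMap]
  simp only [List.foldl_map]
  rfl

theorem find_largest_abs_spec' (m : List (List Int)) :
    find_largest_abs m = find_largest_abs_alt m := by
  cases m with
  | nil => decide
  | cons r t =>
      have hn : (0 : Int) < ((r :: t).length : Int) := by
        simp only [List.length_cons]; positivity
      have hcons : PySem.List.pyRange 0 ((r :: t).length : Int) 1
          = 0 :: PySem.List.pyRange 1 ((r :: t).length : Int) 1 :=
        PySem.List.pyRange_one_cons hn
      set m := r :: t
      set R := PySem.List.pyRange 1 ((m.length : Int)) 1 with hR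
      have hcells : (PySem.List.pyRange 0 (m.length : Int) 1).flatMap
            (fun i => (PySem.List.pyRange 0 (m.length : Int) 1).map (fun j => (i, j)))
          = ((0 : Int), (0 : Int)) ::
            (R.map (fun j => ((0 : Int), j)) ++
              R.flatMap (fun i => (PySem.List.pyRange 0 (m.length : Int) 1).map (fun j => (i, j)))) := by
        rw [hcons]
        simp only [List.flatMap_cons, List.map_cons, List.cons_append]
      set rest := R.map (fun j => ((0 : Int), j)) ++
          R.flatMap (fun i => (PySem.List.pyRange 0 (m.length : Int) 1).map (fun j => (i, j))) with hrest
      -- A side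
      rw [pvA_eq_fold, hcells, pvFold_two_phase]
      -- B side
      show _ = find_largest_abs_alt m
      unfold find_largest_abs_alt
      simp only [hcells]
      rw [List.map_cons, PySem.List.max?_id_cons, List.foldl_map]
      rfl

-- ===== VERDICT (by name: the statement is the Claim_ definition above) =====
theorem find_largest_abs_spec : Claim_equal_find_largest_abs := by
  intro matrix _ _
  unfold Spec_find_largest_abs
  exact find_largest_abs_spec' matrix
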